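-- pv_equiv track=rewrite | github.com/rosesandhello/facescrape | setup_cron.py | remove_existing_jobs
-- ===== SOURCE A (Python) =====
-- CRON_MARKER = "# SCRAPEDFACE-SCANNER"
--
-- def remove_existing_jobs(crontab: str) -> str:
--     """Remove existing FB Arbitrage cron jobs"""
--     lines = crontab.split('\n')
--     filtered = []
--     skip_next = False
--
--     for line in lines:
--         if CRON_MARKER in line:
--             skip_next = True
--             continue
--         if skip_next:
--             skip_next = False
--             continue
--         filtered.append(line)
--
--     return '\n'.join(filtered)
-- ===== SOURCE B (Python) =====
-- CRON_MARKER = "# SCRAPEDFACE-SCANNER"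
--
-- def remove_existing_jobs(crontab: str) -> str:
--     """Remove existing FB Arbitrage cron jobs"""
--     lines = crontab.split('\n')
--     marked = {i for i, line in enumerate(lines) if CRON_MARKER in line}
--     return '\n'.join(line for i, line in enumerate(lines)
--                      if i not in marked and i - 1 not in marked)
-- ===== Notes on version B (the rewrite author's own statement) =====
-- stated objective: alternative
-- what changed: Replaces the stateful skip_next single pass with an index-table construction (set of marker line indices) followed by a stateless membership filter keeping line i iff neither i nor i-1 is a marker index.
import Mathlib
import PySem

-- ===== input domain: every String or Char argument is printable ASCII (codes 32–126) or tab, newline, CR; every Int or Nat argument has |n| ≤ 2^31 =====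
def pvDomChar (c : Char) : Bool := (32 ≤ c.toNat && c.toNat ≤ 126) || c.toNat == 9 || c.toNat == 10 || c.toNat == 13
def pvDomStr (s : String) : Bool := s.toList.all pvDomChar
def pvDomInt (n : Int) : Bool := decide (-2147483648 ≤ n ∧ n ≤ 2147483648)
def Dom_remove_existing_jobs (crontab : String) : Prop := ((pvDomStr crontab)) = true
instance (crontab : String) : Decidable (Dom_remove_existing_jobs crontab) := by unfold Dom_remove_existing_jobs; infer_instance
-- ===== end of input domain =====

-- B replaces A's stateful skip_next single pass by a marker-index set built first and a
-- stateless membership filter (keep line i iff neither i nor i-1 is a marker index); alternative decomposition, same cost.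

def CRON_MARKER : String := "# SCRAPEDFACE-SCANNER"

-- ===== PORT A =====
-- crontab.split('\n'): split? is none only for sep = "", unreachable here, so getD [] is exact.
def remove_existing_jobs (crontab : String) : String :=
  let lines := (PySem.Str.split? crontab "\n").getD []
  let st := lines.foldl
    (fun (st : List String × Bool) line =>
      if PySem.Str.isIn CRON_MARKER line then (st.1, true)
      else if st.2 then (st.1, false)
      else (st.1 ++ [line], false))
    ([], false)
  PySem.Str.join "\n" st.1

-- ===== PORT B =====
def remove_existing_jobs_alt (crontab : String) : String :=
  let lines := (PySem.Str.split? crontab "\n").getD []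
  let marked : PySem.Set Int := PySem.Set.ofList
    (((PySem.List.enumerate lines).filter (fun p => PySem.Str.isIn CRON_MARKER p.2)).map (·.1))
  PySem.Str.join "\n"
    (((PySem.List.enumerate lines).filter
        (fun p => !(marked.contains p.1) && !(marked.contains (p.1 - 1)))).map (·.2))

-- ===== PRECONDITION & SPEC =====
def Spec_remove_existing_jobs (crontab : String) (out : String) : Prop := out = remove_existing_jobs_alt crontab
instance (crontab : String) (out : String) : Decidable (Spec_remove_existing_jobs crontab out) := by unfold Spec_remove_existing_jobs; infer_instance

-- ===== CLAIM (what is proved, stated in full; the proofs are below) =====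
def Claim_equal_remove_existing_jobs : Prop := ∀ (crontab : String), Dom_remove_existing_jobs crontab → Spec_remove_existing_jobs crontab (remove_existing_jobs crontab)

-- ===== LEMMAS AND PROOFS =====

-- the list of marker indices B builds, for an arbitrary line list
def markedList (lines : List String) : List Int :=
  ((PySem.List.enumerate lines).filter (fun p => PySem.Str.isIn CRON_MARKER p.2)).map (·.1)

lemma mem_markedList (lines : List String) (j : Int) :
    j ∈ markedList lines ↔
      ∃ k : Nat, ∃ _ : k < lines.length, j = (k : Int) ∧ PySem.Str.isIn CRON_MARKER lines[k] = true := by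
  simp only [markedList, List.mem_map, List.mem_filter, PySem.List.mem_enumerate_iff]
  constructor
  · rintro ⟨⟨i, l⟩, ⟨⟨k, hk, hp⟩, hm⟩, rfl⟩
    cases hp
    exact ⟨k, hk, by simp, hm⟩
  · rintro ⟨k, hk, rfl, hm⟩
    exact ⟨((k : Int), lines[k]), ⟨⟨k, hk, by simp⟩, hm⟩, rfl⟩

-- characterisation of B's membership test
def cTest (lines : List String) (j : Int) : Bool :=
  (PySem.Set.ofList (markedList lines)).contains j

lemma cTest_nat (lines : List String) (k : Nat) (hk : k < lines.length) :
    cTest lines (k : Int) = PySem.Str.isIn CRON_MARKER lines[k] := by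
  unfold cTest
  by_cases hm : PySem.Str.isIn CRON_MARKER lines[k] = true
  · rw [hm]
    rw [PySem.Set.contains_iff, PySem.Set.mem_ofList, mem_markedList]
    exact ⟨k, hk, rfl, hm⟩
  · rw [Bool.eq_false_iff.mpr hm]
    rw [Bool.eq_false_iff]
    intro hc
    rw [PySem.Set.contains_iff, PySem.Set.mem_ofList, mem_markedList] at hc
    obtain ⟨k', hk', hkk, hm'⟩ := hc
    have : k = k' := by exact_mod_cast hkk
    subst this; exact hm hm'

lemma cTest_neg (lines : List String) (j : Int) (hj : j < 0) :
    cTest lines j = false := by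
  unfold cTest
  rw [Bool.eq_false_iff]
  intro hc
  rw [PySem.Set.contains_iff, PySem.Set.mem_ofList, mem_markedList] at hc
  obtain ⟨k, _, rfl, _⟩ := hc
  omega

-- A's loop as a structural recursion on the remaining lines and the skip flag
def goA (ls : List String) (skip : Bool) : List String :=
  match ls with
  | [] => []
  | l :: ls =>
    if PySem.Str.isIn CRON_MARKER l then goA ls true
    else if skip then goA ls false
    else l :: goA ls false

lemma foldl_eq_goA (ls : List String) (acc : List String) (skip : Bool) :
    (ls.foldl
      (fun (st : List String × Bool) line =>
        if PySem.Str.isIn CRON_MARKER line then (st.1, true)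
        else if st.2 then (st.1, false)
        else (st.1 ++ [line], false))
      (acc, skip)).1 = acc ++ goA ls skip := by
  induction ls generalizing acc skip with
  | nil => simp [goA]
  | cons l ls ih =>
    simp only [List.foldl_cons, goA]
    by_cases h : PySem.Str.isIn CRON_MARKER l = true
    · rw [if_pos h, if_pos h, ih]
    · rw [if_neg h, if_neg h]
      cases skip
      · rw [if_neg (by simp), if_neg (by simp), ih]
        simp
      · rw [if_pos rfl, if_pos rfl, ih]

-- B's filter over a suffix equals A's recursion, with the skip flag = marker test on the previous line
lemma filter_eq_goA (lines : List String) :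
    ∀ (n : Nat) (ls : List String), ls = lines.drop n →
    (((PySem.List.enumerate ls (n : Int)).filter
        (fun p => !(cTest lines p.1) && !(cTest lines (p.1 - 1)))).map (·.2))
      = goA ls (cTest lines ((n : Int) - 1)) := by
  intro n ls
  induction ls generalizing n with
  | nil => intro _; simp [PySem.List.enumerate, goA]
  | cons l ls ih =>
    intro hdrop
    have hn : n < lines.length := by
      by_contra h
      rw [List.drop_eq_nil_of_le (by omega)] at hdrop
      exact List.cons_ne_nil l ls hdrop
    have hl : lines[n] = l := by
      have h0 : lines[n + 0]? = some l := by
        rw [← List.getElem?_drop, ← hdrop]; rfl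
      rw [Nat.add_zero] at h0
      rw [List.getElem?_eq_getElem hn] at h0
      exact Option.some.inj h0
    have htail : ls = lines.drop (n + 1) := by
      have h1 : List.drop 1 (List.drop n lines) = List.drop (n + 1) lines := List.drop_drop
      rw [← hdrop] at h1
      exact (by simpa using h1 : ls = _)
    rw [PySem.List.enumerate_cons]
    have hcn : cTest lines (n : Int) = PySem.Str.isIn CRON_MARKER l := by
      rw [cTest_nat lines n hn, hl]
    have ihn := ih (n + 1) htail
    simp only [Nat.cast_add, Nat.cast_one, add_sub_cancel_right, hcn] at ihn
    simp only [goA, List.filter_cons]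
    by_cases hm : PySem.Str.isIn CRON_MARKER l = true
    · simp only [hm, if_true, hcn, Bool.not_true, Bool.false_and,
        Bool.false_eq_true, if_false]
      rw [hm] at ihn
      exact ihn
    · rw [Bool.eq_false_iff.mpr hm] at hcn ihn ⊢
      simp only [Bool.false_eq_true, if_false]
      by_cases hs : cTest lines ((n : Int) - 1) = true
      · simp only [hs, if_true, hcn, Bool.not_false, Bool.not_true,
          Bool.true_and, Bool.false_eq_true, if_false]
        exact ihn
      · rw [Bool.eq_false_iff.mpr hs]
        simp only [Bool.false_eq_true, if_false, hcn, Bool.not_false,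
          Bool.true_and]
        rw [if_pos trivial, List.map_cons, ihn]

lemma main_list (lines : List String) :
    (((PySem.List.enumerate lines).filter
        (fun p => !(cTest lines p.1) && !(cTest lines (p.1 - 1)))).map (·.2))
      = goA lines false := by
  have h := filter_eq_goA lines 0 lines (by simp)
  simp only [Nat.cast_zero] at h
  rw [cTest_neg lines (0 - 1) (by omega)] at h
  exact h

-- ===== VERDICT (by name: the statement is the Claim_ definition above) =====
theorem remove_existing_jobs_spec : Claim_equal_remove_existing_jobs := by
  intro crontab _
  simp only [Spec_remove_existing_jobs, remove_existing_jobs, remove_existing_jobs_alt]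
  rw [foldl_eq_goA, List.nil_append]
  have h := main_list ((PySem.Str.split? crontab "\n").getD [])
  simp only [cTest, markedList] at h
  exact congrArg (PySem.Str.join "\n") h.symm
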